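-- pv_equiv track=rewrite | github.com/leemanbokgoo/codingProblem | pythonAnswer/stack/removeDuplicateLetters.py | solution
-- ===== SOURCE A (Python) =====
-- import collections
--
-- def solution( s : str ) -> str :
--
--     counter, stack , seen = collections.Counter(s), [] , set()
--     for char in s:
--         counter[char] -= 1
--
--         if char in seen:
--             continue
--
--         while stack and char < stack[-1] and counter[stack[-1]] > 0 :
--             seen.remove(stack.pop())
--         stack.append(char)
--         seen.add(char)
--
--     return ''.join(stack)
-- ===== SOURCE B (Python) =====
-- def solution(s: str) -> str:
--     # Recursive greedy: pick the first output letter directly, recurse on the rest.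
--     if not s:
--         return ''
--     pos = 0
--     for i, ch in enumerate(s):
--         if ch < s[pos]:
--             pos = i
--         if ch not in s[i + 1:]:
--             break
--     c = s[pos]
--     return c + solution(s[pos + 1:].replace(c, ''))
-- ===== Notes on version B (the rewrite author's own statement) =====
-- stated objective: alternative
-- what changed: Replaces the one-pass monotonic-stack algorithm (stack + seen set + live counter with conditional pops) by a recursive greedy: scan once for the leftmost smallest character before the first character that has no later occurrence, emit it, and recurse on the remaining suffix with that letter removed.
import Mathlib
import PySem

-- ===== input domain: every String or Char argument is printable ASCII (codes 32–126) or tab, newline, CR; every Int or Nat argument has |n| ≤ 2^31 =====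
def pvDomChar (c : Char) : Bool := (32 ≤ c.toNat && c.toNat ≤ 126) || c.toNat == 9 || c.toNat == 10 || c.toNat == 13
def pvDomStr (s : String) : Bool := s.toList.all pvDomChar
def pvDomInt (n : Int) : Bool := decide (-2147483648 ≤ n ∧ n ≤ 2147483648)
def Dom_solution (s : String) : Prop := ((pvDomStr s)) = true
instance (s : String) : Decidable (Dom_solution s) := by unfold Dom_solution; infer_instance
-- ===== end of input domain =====

-- B differs from A by algorithm (recursive greedy pick of the first letter vs one-pass monotonic stack); equal return value proved below.

-- ===== PORT A =====
-- while stack and char < stack[-1] and counter[stack[-1]] > 0: seen.remove(stack.pop())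
-- (seen.remove: the popped element is always a member of seen here — it is on the stack — so remove behaves as discard)
def popLoopA (ch : Char) (counter : PySem.Dict Char Int) (stack : List Char)
    (seen : PySem.Set Char) : List Char × PySem.Set Char :=
  match h : stack.getLast? with
  | none => (stack, seen)
  | some top =>
    if ch < top ∧ 0 < counter.getD top 0 then
      popLoopA ch counter stack.dropLast (PySem.Set.discard seen top)
    else (stack, seen)
termination_by stack.length
decreasing_by
  cases stack with
  | nil => simp at h
  | cons a t => simp [List.length_dropLast]

-- for char in s: counter[char] -= 1; if char in seen: continue; <while>; stack.append(char); seen.add(char)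
def loopA : List Char → PySem.Dict Char Int → List Char → PySem.Set Char → List Char
  | [], _, stack, _ => stack
  | ch :: rest, counter, stack, seen =>
    let counter := counter.modify ch 0 (· - 1)
    if PySem.Set.contains seen ch then
      loopA rest counter stack seen
    else
      let p := popLoopA ch counter stack seen
      loopA rest counter (p.1 ++ [ch]) (PySem.Set.add p.2 ch)

def solution (s : String) : String :=
  String.ofList (loopA s.toList (PySem.Dict.counter s.toList) [] PySem.Set.empty)

-- ===== PORT B =====
-- for i, ch in enumerate(s): if ch < s[pos]: pos = i;  if ch not in s[i+1:]: break
-- (best carries the value s[pos] alongside pos, so that s[pos] needs no indexing)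
def altScan : List Char → Nat → Nat → Char → Nat × Char
  | [], _, pos, best => (pos, best)
  | ch :: rest, i, pos, best =>
    let pb := if ch < best then (i, ch) else (pos, best)
    if ch ∈ rest then altScan rest (i + 1) pb.1 pb.2 else pb

-- c = s[pos]; return c + solution(s[pos+1:].replace(c, ''))  (replace of a single char by '' = filter)
def altGo : List Char → List Char
  | [] => []
  | a :: rest =>
    (altScan (a :: rest) 0 0 a).2 ::
      altGo (((a :: rest).drop ((altScan (a :: rest) 0 0 a).1 + 1)).filter
        (fun x => x ≠ (altScan (a :: rest) 0 0 a).2))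
termination_by l => l.length
decreasing_by
  have h1 := List.length_filter_le (fun x => x ≠ (altScan (a :: rest) 0 0 a).2)
    ((a :: rest).drop ((altScan (a :: rest) 0 0 a).1 + 1))
  simp [List.length_drop] at *
  omega

def solution_alt (s : String) : String := String.ofList (altGo s.toList)

-- ===== PRECONDITION & SPEC =====
def Spec_solution (s : String) (out : String) : Prop := out = solution_alt s
instance (s : String) (out : String) : Decidable (Spec_solution s out) := by unfold Spec_solution; infer_instance

-- ===== CLAIM (what is proved, stated in full; the proofs are below) =====
def Claim_equal_solution : Prop := ∀ (s : String), Dom_solution s → Spec_solution s (solution s)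

-- ===== LEMMAS AND PROOFS =====

-- Abstract form of A's loop: stack with top at the HEAD, seen = stack membership,
-- counter test replaced by membership in the remaining suffix.
def popW (ch : Char) (rest : List Char) : List Char → List Char
  | [] => []
  | t :: st => if ch < t ∧ t ∈ rest then popW ch rest st else t :: st

def runS : List Char → List Char → List Char
  | [], st => st
  | ch :: rest, st =>
    if ch ∈ st then runS rest st
    else runS rest (ch :: popW ch rest st)

theorem popW_suffix (ch : Char) (rest st : List Char) : popW ch rest st <:+ st := by
  induction st with
  | nil => exact List.suffix_rfl
  | cons t st ih =>
    simp only [popW]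
    by_cases hc : ch < t ∧ t ∈ rest
    · rw [if_pos hc]; exact ih.trans (List.suffix_cons t st)
    · rw [if_neg hc]

theorem popW_nil_forall (ch : Char) (rest st : List Char) (h : popW ch rest st = []) :
    ∀ b ∈ st, ch < b ∧ b ∈ rest := by
  induction st with
  | nil => simp
  | cons t st ih =>
    simp only [popW] at h
    by_cases hc : ch < t ∧ t ∈ rest
    · rw [if_pos hc] at h
      intro b hb
      rcases List.mem_cons.mp hb with hb | hb
      · exact hb ▸ hc
      · exact ih h b hb
    · rw [if_neg hc] at h; exact absurd h (by simp)

theorem popW_nil_of_all (ch : Char) (rest st : List Char)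
    (h : ∀ t ∈ st, ch < t ∧ t ∈ rest) : popW ch rest st = [] := by
  induction st with
  | nil => rfl
  | cons t st ih =>
    simp only [popW]
    rw [if_pos (h t (by simp))]
    exact ih (fun x hx => h x (by simp [hx]))

theorem mem_popW_of_not_mem_rest (ch : Char) (rest st : List Char) (b : Char)
    (hb : b ∈ st) (hr : b ∉ rest) : b ∈ popW ch rest st := by
  induction st with
  | nil => simp at hb
  | cons t st ih =>
    simp only [popW]
    by_cases hc : ch < t ∧ t ∈ rest
    · rw [if_pos hc]
      rcases List.mem_cons.mp hb with hb | hb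
      · exact absurd hc.2 (hb ▸ hr)
      · exact ih hb
    · rw [if_neg hc]; exact hb

theorem popW_congr_rest (ch : Char) (rest rest' st : List Char)
    (h : ∀ t ∈ st, (t ∈ rest ↔ t ∈ rest')) : popW ch rest st = popW ch rest' st := by
  induction st with
  | nil => rfl
  | cons t st ih =>
    simp only [popW]
    have ht := h t (by simp)
    by_cases hc : ch < t ∧ t ∈ rest
    · rw [if_pos hc, if_pos ⟨hc.1, ht.mp hc.2⟩]
      exact ih (fun x hx => h x (by simp [hx]))
    · rw [if_neg hc, if_neg (by tauto)]

theorem popW_append_singleton (ch c : Char) (rest st : List Char)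
    (h : popW ch rest st = [] → ¬(ch < c ∧ c ∈ rest)) :
    popW ch rest (st ++ [c]) = popW ch rest st ++ [c] := by
  induction st with
  | nil => simp only [List.nil_append, popW]; rw [if_neg (h rfl)]
  | cons t st ih =>
    simp only [List.cons_append, popW]
    by_cases hc : ch < t ∧ t ∈ rest
    · rw [if_pos hc, if_pos hc]
      exact ih (fun hnil => h (by simp only [popW]; rw [if_pos hc]; exact hnil))
    · rw [if_neg hc, if_neg hc]; rfl

-- Phase 2 of the simulation: once some stacked element above c has no later occurrence
-- (or c itself never occurs again), the bottom c is inert and the runs mirror each other.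
theorem phase2 (c : Char) : ∀ (tl st : List Char), c ∉ st →
    (c ∈ tl → ∃ b ∈ st, b ∉ tl) →
    runS tl (st ++ [c]) = runS (tl.filter (fun x => x ≠ c)) st ++ [c] := by
  intro tl
  induction tl with
  | nil => intro st _ _; simp [runS]
  | cons x tl ih =>
    intro st hcst hblock
    by_cases hxc : x = c
    · subst hxc
      have hmem : x ∈ st ++ [x] := by simp
      simp only [runS, List.filter_cons, if_pos hmem]
      simp only [ne_eq, not_true_eq_false, decide_false, Bool.false_eq_true, if_false]
      refine ih st hcst (fun hctl => ?_)
      obtain ⟨b, hb, hnb⟩ := hblock (by simp [hctl])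
      exact ⟨b, hb, fun hh => hnb (by simp [hh])⟩
    · have hfx : (x :: tl).filter (fun y => y ≠ c) = x :: tl.filter (fun y => y ≠ c) := by
        simp [hxc]
      by_cases hxst : x ∈ st
      · have hx2 : x ∈ st ++ [c] := by simp [hxst]
        simp only [runS, hfx, if_pos hx2, if_pos hxst]
        refine ih st hcst (fun hctl => ?_)
        obtain ⟨b, hb, hnb⟩ := hblock (by simp [hctl])
        exact ⟨b, hb, fun hh => hnb (by simp [hh])⟩
      · have hx2 : x ∉ st ++ [c] := by simp [hxst, hxc]
        simp only [runS, hfx, if_neg hx2, if_neg hxst]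
        have hcongr : popW x (tl.filter (fun y => y ≠ c)) st = popW x tl st := by
          refine popW_congr_rest x _ tl st (fun t ht => ?_)
          have htc : t ≠ c := fun hh => hcst (hh ▸ ht)
          simp [List.mem_filter, htc]
        have happ : popW x tl (st ++ [c]) = popW x tl st ++ [c] := by
          refine popW_append_singleton x c tl st (fun hnil hcond => ?_)
          obtain ⟨b, hb, hnb⟩ := hblock (by simp [hcond.2])
          have := popW_nil_forall x tl st hnil b hb
          exact hnb (by simp [this.2])
        rw [happ, hcongr]
        have hassoc : x :: (popW x tl st ++ [c]) = (x :: popW x tl st) ++ [c] := rfl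
        rw [hassoc]
        refine ih (x :: popW x tl st) ?_ ?_
        · intro hcm
          rcases List.mem_cons.mp hcm with hh | hh
          · exact hxc hh.symm
          · exact hcst ((popW_suffix x tl st).subset hh)
        · intro hctl
          obtain ⟨b, hb, hnb⟩ := hblock (by simp [hctl])
          have hbtl : b ∉ tl := fun hh => hnb (by simp [hh])
          exact ⟨b, by simp [mem_popW_of_not_mem_rest x tl st b hb hbtl], hbtl⟩

-- Phase 1: the scanned window after the chosen position consists of characters ≥ c and ends
-- in a character with no later occurrence; processing it establishes phase 2's blocker.
theorem phase1 (c m : Char) : ∀ (mid tl st : List Char),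
    mid.getLast? = some m → m ∉ tl → (∀ x ∈ mid, c ≤ x) → c ∉ st →
    runS (mid ++ tl) (st ++ [c]) = runS ((mid ++ tl).filter (fun x => x ≠ c)) st ++ [c] := by
  intro mid
  induction mid with
  | nil => intro tl st h; simp at h
  | cons x mid ih =>
    intro tl st hlast hmtl hle hcst
    have hcx : c ≤ x := hle x (by simp)
    cases hmidc : mid with
    | nil =>
      subst hmidc
      have hxm : x = m := by simpa using hlast
      have hmtl2 : x ∉ tl := by rw [hxm]; exact hmtl
      simp only [List.nil_append, List.cons_append]
      by_cases hmc : x = c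
      · subst hmc
        have hmem : x ∈ st ++ [x] := by simp
        simp only [runS, List.filter_cons, if_pos hmem]
        simp only [ne_eq, not_true_eq_false, decide_false, Bool.false_eq_true, if_false]
        exact phase2 x tl st hcst (fun h => absurd h hmtl2)
      · have hfx : (x :: tl).filter (fun y => y ≠ c) = x :: tl.filter (fun y => y ≠ c) := by
          simp [hmc]
        by_cases hmst : x ∈ st
        · have hm2 : x ∈ st ++ [c] := by simp [hmst]
          rw [hfx]
          simp only [runS, if_pos hm2, if_pos hmst]
          exact phase2 c tl st hcst (fun _ => ⟨x, hmst, hmtl2⟩)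
        · have hm2 : x ∉ st ++ [c] := by simp [hmst, hmc]
          rw [hfx]
          simp only [runS, if_neg hm2, if_neg hmst]
          have hclt : c < x := lt_of_le_of_ne hcx (Ne.symm hmc)
          have happ : popW x tl (st ++ [c]) = popW x tl st ++ [c] := by
            refine popW_append_singleton x c tl st (fun _ hcond => ?_)
            exact absurd hcond.1 (not_lt_of_gt hclt)
          have hcongr : popW x (tl.filter (fun y => y ≠ c)) st = popW x tl st := by
            refine popW_congr_rest x _ tl st (fun t ht => ?_)
            have htc : t ≠ c := fun hh => hcst (hh ▸ ht)
            simp [List.mem_filter, htc]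
          rw [happ, hcongr]
          have hassoc : x :: (popW x tl st ++ [c]) = (x :: popW x tl st) ++ [c] := rfl
          rw [hassoc]
          refine phase2 c tl (x :: popW x tl st) ?_ (fun _ => ⟨x, by simp, hmtl2⟩)
          intro hcm
          rcases List.mem_cons.mp hcm with hh | hh
          · exact hmc hh.symm
          · exact hcst ((popW_suffix x tl st).subset hh)
    | cons y mid' =>
      have hmidne : mid ≠ [] := by rw [hmidc]; simp
      have hlast' : mid.getLast? = some m := by
        rw [hmidc] at hlast
        rw [hmidc]
        simpa [List.getLast?_cons_cons] using hlast
      rw [← hmidc] at *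
      have hle' : ∀ z ∈ mid, c ≤ z := fun z hz => hle z (by simp [hz])
      simp only [List.cons_append, runS]
      by_cases hxc : x = c
      · subst hxc
        have hmem : x ∈ st ++ [x] := by simp
        rw [if_pos hmem]
        have hfx : (x :: (mid ++ tl)).filter (fun y => y ≠ x) =
            (mid ++ tl).filter (fun y => y ≠ x) := by
          simp
        rw [hfx]
        exact ih tl st hlast' hmtl hle' hcst
      · have hfx : (x :: (mid ++ tl)).filter (fun y => y ≠ c) =
            x :: (mid ++ tl).filter (fun y => y ≠ c) := by
          simp [hxc]
        by_cases hxst : x ∈ st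
        · have hx2 : x ∈ st ++ [c] := by simp [hxst]
          rw [if_pos hx2, hfx, runS, if_pos hxst]
          exact ih tl st hlast' hmtl hle' hcst
        · have hx2 : x ∉ st ++ [c] := by simp [hxst, hxc]
          rw [if_neg hx2, hfx, runS, if_neg hxst]
          have hclt : c < x := lt_of_le_of_ne hcx (Ne.symm hxc)
          have happ : popW x (mid ++ tl) (st ++ [c]) = popW x (mid ++ tl) st ++ [c] := by
            refine popW_append_singleton x c (mid ++ tl) st (fun _ hcond => ?_)
            exact absurd hcond.1 (not_lt_of_gt hclt)
          have hcongr : popW x ((mid ++ tl).filter (fun y => y ≠ c)) st =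
              popW x (mid ++ tl) st := by
            refine popW_congr_rest x _ (mid ++ tl) st (fun t ht => ?_)
            have htc : t ≠ c := fun hh => hcst (hh ▸ ht)
            simp [List.mem_filter, htc]
          rw [happ, hcongr]
          have hassoc : x :: (popW x (mid ++ tl) st ++ [c]) =
              (x :: popW x (mid ++ tl) st) ++ [c] := rfl
          rw [hassoc]
          refine ih tl (x :: popW x (mid ++ tl) st) hlast' hmtl hle' ?_
          intro hcm
          rcases List.mem_cons.mp hcm with hh | hh
          · exact hxc hh.symm
          · exact hcst ((popW_suffix x (mid ++ tl) st).subset hh)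

-- Phase 0: every character strictly before the chosen position is greater than c and
-- occurs again after it, so the arrival of c empties the stack.
theorem phase0 (c : Char) : ∀ (pre suf st : List Char), c ∉ st →
    (∀ x ∈ st, c < x ∧ x ∈ suf) → (∀ x ∈ pre, c < x ∧ x ∈ suf) →
    runS (pre ++ c :: suf) st = runS suf [c] := by
  intro pre
  induction pre with
  | nil =>
    intro suf st hcst hst _
    simp only [List.nil_append, runS]
    rw [if_neg hcst, popW_nil_of_all c suf st hst]
  | cons x pre ih =>
    intro suf st hcst hst hpre
    have hx := hpre x (by simp)
    simp only [List.cons_append, runS]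
    by_cases hxst : x ∈ st
    · rw [if_pos hxst]
      exact ih suf st hcst hst (fun y hy => hpre y (by simp [hy]))
    · rw [if_neg hxst]
      refine ih suf _ ?_ ?_ (fun y hy => hpre y (by simp [hy]))
      · intro hcm
        rcases List.mem_cons.mp hcm with hh | hh
        · exact absurd hh (ne_of_lt hx.1)
        · exact hcst ((popW_suffix x (pre ++ c :: suf) st).subset hh)
      · intro y hy
        rcases List.mem_cons.mp hy with hh | hh
        · exact hh ▸ hx
        · exact hst y ((popW_suffix x (pre ++ c :: suf) st).subset hh)

-- The window l[0..j]: shortest prefix ending at the first character with no later occurrence.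
def window : List Char → List Char
  | [] => []
  | x :: r => if x ∈ r then x :: window r else [x]

def afterW : List Char → List Char
  | [] => []
  | x :: r => if x ∈ r then afterW r else r

theorem window_append_afterW (l : List Char) : window l ++ afterW l = l := by
  induction l with
  | nil => rfl
  | cons x r ih =>
    simp only [window, afterW]
    by_cases hx : x ∈ r
    · rw [if_pos hx, if_pos hx]; simpa using ih
    · rw [if_neg hx, if_neg hx]; rfl

theorem window_ne_nil (l : List Char) (h : l ≠ []) : window l ≠ [] := by
  cases l with
  | nil => exact absurd rfl h
  | cons x r =>
    simp only [window]
    by_cases hx : x ∈ r <;> simp [hx]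

theorem window_getLast_not_afterW (l : List Char) (m : Char)
    (h : (window l).getLast? = some m) : m ∉ afterW l := by
  induction l with
  | nil => simp [window] at h
  | cons x r ih =>
    simp only [window, afterW] at *
    by_cases hx : x ∈ r
    · rw [if_pos hx] at h ⊢
      cases hwr : window r with
      | nil => exact absurd hwr (window_ne_nil r (by rintro rfl; simp at hx))
      | cons b bs =>
        rw [hwr, List.getLast?_cons_cons, ← hwr] at h
        exact ih h
    · rw [if_neg hx] at h ⊢
      simp only [List.getLast?_singleton, Option.some.injEq] at h
      exact h ▸ hx

-- Every character among the first p characters occurs again from position p on,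
-- provided p is inside the window.
theorem window_take_mem_drop : ∀ (l : List Char) (p : Nat), p < (window l).length →
    ∀ x ∈ l.take p, x ∈ l.drop p := by
  intro l
  induction l with
  | nil => simp
  | cons y r ih =>
    intro p hp x hx
    by_cases hy : y ∈ r
    · rw [window, if_pos hy, List.length_cons] at hp
      cases p with
      | zero => simp at hx
      | succ p' =>
        have hp' : p' < (window r).length := by omega
        rw [List.take_succ_cons] at hx
        rw [List.drop_succ_cons]
        rcases List.mem_cons.mp hx with hh | hh
        · subst hh
          rcases List.mem_append.mp ((List.take_append_drop p' r).symm ▸ hy) with h2 | h2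
          · exact ih p' hp' x h2
          · exact h2
        · exact ih p' hp' x hh
    · rw [window, if_neg hy] at hp
      simp only [List.length_singleton] at hp
      interval_cases p
      simp at hx

-- The break-at-first-last-occurrence scan is a running minimum over the window.
def minFold : List Char → Nat → Nat × Char → Nat × Char
  | [], _, pb => pb
  | x :: r, i, pb => minFold r (i + 1) (if x < pb.2 then (i, x) else pb)

theorem altScan_eq_minFold : ∀ (rem : List Char) (i pos : Nat) (best : Char),
    altScan rem i pos best = minFold (window rem) i (pos, best) := by
  intro rem
  induction rem with
  | nil => intro i pos best; rfl
  | cons x r ih =>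
    intro i pos best
    simp only [altScan, window]
    by_cases hx : x ∈ r
    · rw [if_pos (by simpa using hx), if_pos hx]
      simp only [minFold]
      by_cases h2 : x < best <;> simp [h2, ih]
    · rw [if_neg (by simpa using hx), if_neg hx]
      simp only [minFold]

theorem minFold_spec : ∀ (w : List Char) (i pos : Nat) (best : Char),
    (minFold w i (pos, best) = (pos, best) ∧ ∀ x ∈ w, best ≤ x) ∨
    (∃ k, ∃ hk : k < w.length, (minFold w i (pos, best)).1 = i + k ∧
      (minFold w i (pos, best)).2 = w[k] ∧ w[k] < best ∧
      (∀ x ∈ w.take k, w[k] < x) ∧ (∀ x ∈ w.drop k, w[k] ≤ x)) := by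
  intro w
  induction w with
  | nil => intro i pos best; left; exact ⟨rfl, by simp⟩
  | cons y w ih =>
    intro i pos best
    have hstep : minFold (y :: w) i (pos, best) =
        minFold w (i + 1) (if y < best then (i, y) else (pos, best)) := rfl
    by_cases hy : y < best
    · rw [if_pos hy] at hstep
      rcases ih (i + 1) i y with ⟨heq, hall⟩ | ⟨k, hk, h1, h2, h3, h4, h5⟩
      · right
        refine ⟨0, by simp, ?_, ?_, ?_, by simp, ?_⟩
        · simp [hstep, heq]
        · simp [hstep, heq]
        · simpa using hy
        · intro x hx
          rw [List.drop_zero] at hx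
          rcases List.mem_cons.mp hx with rfl | hh
          · simp
          · simpa using hall x hh
      · right
        refine ⟨k + 1, Nat.succ_lt_succ hk, ?_, ?_, ?_, ?_, ?_⟩
        · rw [hstep, h1]; omega
        · rw [hstep]; simpa using h2
        · simpa using lt_trans h3 hy
        · intro x hx
          rw [List.take_succ_cons] at hx
          rcases List.mem_cons.mp hx with rfl | hh
          · simpa using h3
          · simpa using h4 x hh
        · intro x hx
          rw [List.drop_succ_cons] at hx
          simpa using h5 x hx
    · rw [if_neg hy] at hstep
      have hy' : best ≤ y := le_of_not_gt hy
      rcases ih (i + 1) pos best with ⟨heq, hall⟩ | ⟨k, hk, h1, h2, h3, h4, h5⟩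
      · left
        refine ⟨by rw [hstep, heq], ?_⟩
        intro x hx
        rcases List.mem_cons.mp hx with rfl | hh
        · exact hy'
        · exact hall x hh
      · right
        refine ⟨k + 1, Nat.succ_lt_succ hk, ?_, ?_, ?_, ?_, ?_⟩
        · rw [hstep, h1]; omega
        · rw [hstep]; simpa using h2
        · simpa using h3
        · intro x hx
          rw [List.take_succ_cons] at hx
          rcases List.mem_cons.mp hx with rfl | hh
          · simpa using lt_of_lt_of_le h3 hy'
          · simpa using h4 x hh
        · intro x hx
          rw [List.drop_succ_cons] at hx
          simpa using h5 x hx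

-- What the scan of B computes: a decomposition of the window around the chosen character.
theorem scan_spec (a : Char) (rest : List Char) :
    ∃ pre suf, window (a :: rest) = pre ++ (altScan (a :: rest) 0 0 a).2 :: suf ∧
      pre.length = (altScan (a :: rest) 0 0 a).1 ∧
      (∀ x ∈ pre, (altScan (a :: rest) 0 0 a).2 < x) ∧
      (∀ x ∈ suf, (altScan (a :: rest) 0 0 a).2 ≤ x) := by
  have he := altScan_eq_minFold (a :: rest) 0 0 a
  obtain ⟨w', hw⟩ : ∃ w', window (a :: rest) = a :: w' := by
    simp only [window]
    by_cases h : a ∈ rest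
    · exact ⟨window rest, by rw [if_pos h]⟩
    · exact ⟨[], by rw [if_neg h]⟩
  rcases minFold_spec (window (a :: rest)) 0 0 a with ⟨heq, hall⟩ | ⟨k, hk, h1, h2, h3, h4, h5⟩
  · refine ⟨[], w', ?_, ?_, by simp, ?_⟩
    · rw [he, heq]; simpa using hw
    · rw [he, heq]; rfl
    · intro x hx
      rw [he, heq]
      exact hall x (by rw [hw]; simp [hx])
  · refine ⟨(window (a :: rest)).take k, (window (a :: rest)).drop (k + 1), ?_, ?_, ?_, ?_⟩
    · rw [he, h2]
      conv_lhs => rw [← List.take_append_drop k (window (a :: rest))]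
      rw [List.drop_eq_getElem_cons hk]
    · rw [he, h1, List.length_take]
      omega
    · intro x hx
      rw [he, h2]
      exact h4 x hx
    · intro x hx
      rw [he, h2]
      refine h5 x ?_
      rw [List.drop_eq_getElem_cons hk]
      exact List.mem_cons_of_mem _ hx

theorem altGo_nil : altGo [] = [] := by rw [altGo]

theorem altGo_cons (a : Char) (rest : List Char) :
    altGo (a :: rest) = (altScan (a :: rest) 0 0 a).2 ::
      altGo (((a :: rest).drop ((altScan (a :: rest) 0 0 a).1 + 1)).filter
        (fun x => x ≠ (altScan (a :: rest) 0 0 a).2)) := by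
  rw [altGo]

-- The peel: the stack run on l yields c followed by the stack run on the reduced suffix,
-- which is one unfolding of the greedy altGo; strong induction on the length closes it.
theorem runS_eq_altGo : ∀ (n : Nat) (l : List Char), l.length ≤ n →
    (runS l []).reverse = altGo l := by
  intro n
  induction n with
  | zero =>
    intro l h
    cases l with
    | nil => rw [altGo_nil]; rfl
    | cons a rest => simp at h
  | succ n ih =>
    intro l hlen
    cases l with
    | nil => rw [altGo_nil]; rfl
    | cons a rest =>
      obtain ⟨pre, suf, hw, hplen, hpre_gt, hsuf_ge⟩ := scan_spec a rest
      set p := (altScan (a :: rest) 0 0 a).1 with hp_def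
      set c := (altScan (a :: rest) 0 0 a).2 with hc_def
      have hwt : window (a :: rest) ++ afterW (a :: rest) = a :: rest :=
        window_append_afterW (a :: rest)
      set t := afterW (a :: rest) with ht_def
      have hl : a :: rest = pre ++ c :: (suf ++ t) := by
        rw [← hwt, hw]; simp
      have hwin_len : p < (window (a :: rest)).length := by
        rw [hw, ← hplen, List.length_append, List.length_cons]
        omega
      have htake : (a :: rest).take p = pre := by
        conv_lhs => rw [hl, ← hplen]
        exact List.take_left ..
      have hdropp : (a :: rest).drop p = c :: (suf ++ t) := by
        conv_lhs => rw [hl, ← hplen]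
        exact List.drop_left ..
      have hdrop1 : (a :: rest).drop (p + 1) = suf ++ t := by
        have h1 : (a :: rest).drop (p + 1) = ((a :: rest).drop p).drop 1 := by
          rw [List.drop_drop]
        rw [h1, hdropp, List.drop_succ_cons, List.drop_zero]
      have hpre : ∀ x ∈ pre, c < x ∧ x ∈ suf ++ t := by
        intro x hx
        refine ⟨hpre_gt x hx, ?_⟩
        have hxd : x ∈ (a :: rest).drop p :=
          window_take_mem_drop (a :: rest) p hwin_len x (htake ▸ hx)
        rw [hdropp] at hxd
        rcases List.mem_cons.mp hxd with hh | hh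
        · exact absurd hh.symm (ne_of_lt (hpre_gt x hx))
        · exact hh
      have step1 : runS (a :: rest) [] = runS (suf ++ t) [c] := by
        conv_lhs => rw [hl]
        exact phase0 c pre (suf ++ t) [] (by simp) (by simp) hpre
      have step2 : runS (suf ++ t) [c] =
          runS ((suf ++ t).filter (fun x => x ≠ c)) [] ++ [c] := by
        cases hsuf : suf with
        | nil =>
          subst hsuf
          have hct : c ∉ t := by
            apply window_getLast_not_afterW (a :: rest)
            rw [hw, List.getLast?_concat]
          have h2 := phase2 c t [] (by simp) (fun h => absurd h hct)
          simpa using h2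
        | cons y suf' =>
          have hne : suf ≠ [] := by rw [hsuf]; simp
          obtain ⟨m, hm⟩ : ∃ m, suf.getLast? = some m := by
            cases hgl : suf.getLast? with
            | none => exact absurd (List.getLast?_eq_none_iff.mp hgl) hne
            | some m => exact ⟨m, rfl⟩
          have hcs : (c :: suf).getLast? = some m := by
            rw [show c :: suf = [c] ++ suf from rfl, List.getLast?_append, hm]
            rfl
          have hmw : (window (a :: rest)).getLast? = some m := by
            rw [hw, List.getLast?_append, hcs]
            rfl
          have hmt : m ∉ t := window_getLast_not_afterW (a :: rest) m hmw
          rw [← hsuf]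
          have h1 := phase1 c m suf t [] hm hmt hsuf_ge (by simp)
          simpa using h1
      have hlen' : ((suf ++ t).filter (fun x => x ≠ c)).length ≤ n := by
        have hf := List.length_filter_le (fun x => x ≠ c) (suf ++ t)
        have hll : (a :: rest).length = pre.length + ((suf ++ t).length + 1) := by
          rw [hl]; simp
        simp only [List.length_cons] at hll hlen
        omega
      have step3 := ih _ hlen'
      rw [step1, step2, List.reverse_append, List.reverse_singleton,
        List.singleton_append, step3]
      rw [altGo_cons, ← hp_def, ← hc_def, hdrop1]

-- ===== Bridging port A to the abstract run =====

theorem popLoopA_nil (ch : Char) (d : PySem.Dict Char Int) (seen : PySem.Set Char) :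
    popLoopA ch d [] seen = ([], seen) := by
  rw [popLoopA]
  split
  · rfl
  · next top h => simp at h

theorem popLoopA_concat (ch : Char) (d : PySem.Dict Char Int) (st : List Char) (t : Char)
    (seen : PySem.Set Char) :
    popLoopA ch d (st ++ [t]) seen =
      if ch < t ∧ 0 < d.getD t 0 then popLoopA ch d st (PySem.Set.discard seen t)
      else (st ++ [t], seen) := by
  rw [popLoopA]
  split
  · next h => simp at h
  · next top h =>
    rw [List.getLast?_concat] at h
    obtain rfl : t = top := by simpa using h
    rw [List.dropLast_concat]

theorem popLoopA_bridge (ch : Char) (rest : List Char) (d : PySem.Dict Char Int) :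
    ∀ (st : List Char) (seen : PySem.Set Char),
    (∀ x, d.getD x 0 = (rest.count x : Int)) →
    (∀ x, x ∈ seen ↔ x ∈ st) → List.Nodup seen → List.Nodup st →
    ∃ seen', popLoopA ch d st.reverse seen = ((popW ch rest st).reverse, seen') ∧
      (∀ x, x ∈ seen' ↔ x ∈ popW ch rest st) ∧ List.Nodup seen' := by
  intro st
  induction st with
  | nil =>
    intro seen _ hseen hnd _
    refine ⟨seen, ?_, ?_, hnd⟩
    · simp only [List.reverse_nil, popW, popLoopA_nil]
    · intro x
      simpa [popW] using hseen x
  | cons t st ih =>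
    intro seen hd hseen hnd hndst
    have hrev : (t :: st).reverse = st.reverse ++ [t] := by simp
    have hcnt : (0 < d.getD t 0) ↔ t ∈ rest := by
      simp [hd t, Int.natCast_pos, List.count_pos_iff]
    rw [hrev, popLoopA_concat]
    by_cases hc : ch < t ∧ t ∈ rest
    · rw [if_pos ⟨hc.1, hcnt.mpr hc.2⟩]
      have htst : t ∉ st := (List.nodup_cons.mp hndst).1
      have hseen' : ∀ x, x ∈ PySem.Set.discard seen t ↔ x ∈ st := by
        intro x
        rw [PySem.Set.mem_discard]
        constructor
        · rintro ⟨hx, hxt⟩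
          rcases List.mem_cons.mp ((hseen x).mp hx) with hh | hh
          · exact absurd hh hxt
          · exact hh
        · intro hx
          exact ⟨(hseen x).mpr (by simp [hx]), fun hh => htst (hh ▸ hx)⟩
      obtain ⟨seen', h1, h2, h3⟩ := ih (PySem.Set.discard seen t) hd hseen'
        (PySem.Set.nodup_discard seen t hnd) (List.nodup_cons.mp hndst).2
      refine ⟨seen', ?_, ?_, h3⟩
      · rw [h1]
        congr 1
        simp only [popW]
        rw [if_pos hc]
      · intro x
        rw [h2]
        simp only [popW]
        rw [if_pos hc]
    · have hn : ¬(ch < t ∧ 0 < d.getD t 0) := fun hh => hc ⟨hh.1, hcnt.mp hh.2⟩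
      rw [if_neg hn]
      refine ⟨seen, ?_, ?_, hnd⟩
      · simp only [popW]
        rw [if_neg hc, ← hrev]
      · intro x
        simp only [popW]
        rw [if_neg hc]
        exact hseen x

theorem loopA_bridge : ∀ (l : List Char) (d : PySem.Dict Char Int) (st : List Char)
    (seen : PySem.Set Char),
    (∀ x, d.getD x 0 = (l.count x : Int)) →
    (∀ x, x ∈ seen ↔ x ∈ st) → List.Nodup seen → List.Nodup st →
    loopA l d st.reverse seen = (runS l st).reverse := by
  intro l
  induction l with
  | nil => intro d st seen _ _ _ _; rfl
  | cons ch rest ih =>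
    intro d st seen hd hseen hnd hndst
    have hd' : ∀ x, (d.modify ch 0 (· - 1)).getD x 0 = (rest.count x : Int) := by
      intro x
      rw [PySem.Dict.getD_modify]
      by_cases hx : x = ch
      · rw [if_pos hx, hd ch, hx]
        simp
      · have hx' : ¬(ch = x) := fun hh => hx hh.symm
        rw [if_neg hx, hd x]
        simp [hx']
    simp only [loopA, runS]
    by_cases hch : ch ∈ st
    · rw [if_pos ((PySem.Set.contains_iff seen ch).mpr ((hseen ch).mpr hch)), if_pos hch]
      exact ih _ st seen hd' hseen hnd hndst
    · have hnc : ¬ PySem.Set.contains seen ch = true := fun hh =>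
        hch ((hseen ch).mp ((PySem.Set.contains_iff seen ch).mp hh))
      rw [if_neg hnc, if_neg hch]
      obtain ⟨seen', h1, h2, h3⟩ := popLoopA_bridge ch rest (d.modify ch 0 (· - 1)) st seen
        hd' hseen hnd hndst
      rw [h1]
      have hchpop : ch ∉ popW ch rest st := fun hh =>
        hch ((popW_suffix ch rest st).subset hh)
      have hrev : (popW ch rest st).reverse ++ [ch] = (ch :: popW ch rest st).reverse := by
        simp
      rw [hrev]
      refine ih _ (ch :: popW ch rest st) (PySem.Set.add seen' ch) hd' ?_ ?_ ?_
      · intro x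
        rw [PySem.Set.mem_add]
        constructor
        · rintro (hx | hx)
          · exact List.mem_cons_of_mem ch ((h2 x).mp hx)
          · simp [hx]
        · intro hx
          rcases List.mem_cons.mp hx with hh | hh
          · right; exact hh
          · left; exact (h2 x).mpr hh
      · exact PySem.Set.nodup_add seen' ch h3
      · exact List.nodup_cons.mpr ⟨hchpop, ((popW_suffix ch rest st).sublist).nodup hndst⟩

-- ===== VERDICT (by name: the statement is the Claim_ definition above) =====
theorem solution_spec : Claim_equal_solution := by
  intro s _
  unfold Spec_solution solution solution_alt
  have h1 := loopA_bridge s.toList (PySem.Dict.counter s.toList) [] PySem.Set.empty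
    (fun x => PySem.Dict.getD_counter s.toList x)
    (fun x => by simp [PySem.Set.empty]) (by simp [PySem.Set.empty]) (by simp)
  have h2 := runS_eq_altGo s.toList.length s.toList (le_refl _)
  simp only [List.reverse_nil] at h1
  rw [h1, h2]
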